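-- pv_equiv track=rewrite | github.com/cbizon/AOC_24 | day19/d19p2.py | recursively_count
-- ===== SOURCE A (Python) =====
-- def recursively_count(histories, pattern, counts):
--     #Interestingly, even doing this can be slow.  So we need to avoid redoing work with the counts dict
--     # where we stash partially computed results.
--     n = 0
--     for sub_pattern in histories[pattern]:
--         if sub_pattern in counts:
--             n += counts[sub_pattern]
--         else:
--             if len(sub_pattern) == 0:
--                 c = 1
--             else:
--                 c = recursively_count(histories,sub_pattern,counts)
--             counts[sub_pattern] = c
--             n += c
--     return n
-- ===== SOURCE B (Python) =====
-- def recursively_count(histories, pattern, counts):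
--     # Iterative rewrite (no recursion): collect the keys reachable from `pattern`
--     # through uncached, non-empty sub-patterns (BFS), then resolve them bottom-up
--     # by rounds of relaxation.  `counts` is read but never mutated, whereas A
--     # fills it in place: the equivalence with A is about the RETURN value only.
--     reachable = []
--     frontier = [pattern]
--     while frontier:
--         k = frontier.pop(0)
--         if k not in reachable:
--             reachable.append(k)
--             for s in histories[k]:
--                 if s and s not in counts:
--                     frontier.append(s)
--     values = dict(counts)
--
--     def known(s):
--         return s == "" or s in values
--
--     def total(subs):
--         return sum(values[s] if s in values else 1 for s in subs)
--
--     while not all(known(s) for s in histories[pattern]):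
--         for k in reachable:
--             if k and k not in values and all(known(s) for s in histories[k]):
--                 values[k] = total(histories[k])
--     return total(histories[pattern])
-- ===== Notes on version B (the rewrite author's own statement) =====
-- stated objective: alternative
-- what changed: Top-down memoized recursion is replaced by a recursion-free two-phase algorithm: a BFS collects the keys reachable from the pattern through uncached non-empty sub-patterns, then rounds of bottom-up relaxation fill a fresh value table until the pattern's own sum is computable; `counts` is read but never mutated (return-value equivalence only).
import Mathlib
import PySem

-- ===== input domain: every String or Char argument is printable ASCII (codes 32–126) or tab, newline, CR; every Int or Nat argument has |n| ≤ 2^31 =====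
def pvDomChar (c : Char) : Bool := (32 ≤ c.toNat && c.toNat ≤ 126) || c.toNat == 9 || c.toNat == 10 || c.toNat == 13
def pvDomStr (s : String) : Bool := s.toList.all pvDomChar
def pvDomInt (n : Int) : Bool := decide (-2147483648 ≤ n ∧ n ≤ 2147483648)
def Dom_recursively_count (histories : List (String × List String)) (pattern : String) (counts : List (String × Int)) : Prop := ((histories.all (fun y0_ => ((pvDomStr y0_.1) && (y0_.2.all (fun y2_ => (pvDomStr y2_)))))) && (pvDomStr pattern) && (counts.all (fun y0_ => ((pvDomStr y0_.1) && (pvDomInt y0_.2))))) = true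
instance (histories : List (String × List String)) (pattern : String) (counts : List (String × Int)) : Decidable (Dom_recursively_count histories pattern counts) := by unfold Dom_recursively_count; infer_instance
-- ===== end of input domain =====

-- B replaces A's top-down memoized recursion by a recursion-free two-phase algorithm
-- (BFS reachability scan, then rounds of bottom-up relaxation); A mutates `counts` in
-- place and B does not: the equivalence proved here is about the RETURN value only.

-- shared size bound: total number of sub-pattern entries in the histories dict (+1);
-- used only as a totalization fuel for the ports' loops/recursion and as the iteration
-- count of the reachability closure in Pre_
def pvE (H : PySem.Dict String (List String)) : Nat :=
  (H.items.map (fun kv => kv.2.length)).sum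
def pvN (H : PySem.Dict String (List String)) : Nat := pvE H + 1

-- ===== PORT A =====
-- A's recursion threads the mutable `counts` dict through as state; the Nat fuel
-- (pvN H + 1) is only a totalization guard — under Pre_ the recursion depth is
-- bounded by the number of reachable sub-patterns, so the fuel is never exhausted.
-- the body of A's `for sub_pattern in histories[pattern]` loop, with `rec` the recursive call
def pvBodyA (rec : String → PySem.Dict String Int → Int × PySem.Dict String Int)
    (st : Int × PySem.Dict String Int) (sub : String) : Int × PySem.Dict String Int :=
  match st.2.get? sub with
  | some v => (st.1 + v, st.2)
  | none =>
    let r := if PySem.Str.len sub == 0 then ((1 : Int), st.2) else rec sub st.2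
    (st.1 + r.1, r.2.insert sub r.1)

def pvGoA (H : PySem.Dict String (List String)) :
    Nat → String → PySem.Dict String Int → Int × PySem.Dict String Int
  | 0, _, c => (0, c)
  | f + 1, p, c => (H.getD p []).foldl (pvBodyA (pvGoA H f)) (0, c)

def recursively_count (histories : List (String × List String)) (pattern : String) (counts : List (String × Int)) : Int :=
  (pvGoA (PySem.Dict.ofList histories) (pvN (PySem.Dict.ofList histories) + 1) pattern (PySem.Dict.ofList counts)).1

-- ===== PORT B =====
-- `[s for s in histories[k] if s and s not in counts]`: the uncached non-empty sub-patterns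
def pvSuccsL (H : PySem.Dict String (List String)) (c0 : PySem.Dict String Int)
    (k : String) : List String :=
  (H.getD k []).filter (fun s => !(s == "") && !(c0.contains s))

-- B's first while loop (BFS): `k = frontier.pop(0); if k not in reachable: append k, push succs`;
-- fuel is a totalization guard only
def pvReachGo (H : PySem.Dict String (List String)) (c0 : PySem.Dict String Int) :
    Nat → List String → List String → List String
  | 0, _, r => r
  | _ + 1, [], r => r
  | f + 1, k :: fr, r =>
    if k ∈ r then pvReachGo H c0 f fr r
    else pvReachGo H c0 f (fr ++ pvSuccsL H c0 k) (r ++ [k])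

-- `known(s)` and `total(subs)` from Source B
def pvKnown (v : PySem.Dict String Int) (s : String) : Bool := s == "" || v.contains s
def pvTotal (v : PySem.Dict String Int) (subs : List String) : Int :=
  subs.foldl (fun n s => n + (match v.get? s with | some w => w | none => 1)) 0

-- one `for k in reachable` relaxation pass of Source B's second while loop
def pvPass (H : PySem.Dict String (List String)) (rl : List String)
    (v : PySem.Dict String Int) : PySem.Dict String Int :=
  rl.foldl (fun v k =>
    if (!(k == "") && !(v.contains k) && (H.getD k []).all (pvKnown v)) = true
    then v.insert k (pvTotal v (H.getD k []))
    else v) v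

-- Source B's `while not all(known(s) for s in histories[pattern])`; fuel is a totalization guard only
def pvRounds (H : PySem.Dict String (List String)) (rl : List String) (subsP : List String) :
    Nat → PySem.Dict String Int → PySem.Dict String Int
  | 0, v => v
  | f + 1, v =>
    if subsP.all (pvKnown v) then v else pvRounds H rl subsP f (pvPass H rl v)

def recursively_count_alt (histories : List (String × List String)) (pattern : String) (counts : List (String × Int)) : Int :=
  let H := PySem.Dict.ofList histories
  let c0 := PySem.Dict.ofList counts
  let rl := pvReachGo H c0 (2 * pvN H + 1) [pattern] []
  let subsP := H.getD pattern []
  pvTotal (pvRounds H rl subsP (pvN H) c0) subsP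

-- ===== PRECONDITION & SPEC =====
-- reachability closure used by Pre_: one step adds the uncached non-empty sub-patterns
-- of every member, iterated pvN H times (enough to reach the fixpoint)
def pvStepF (H : PySem.Dict String (List String)) (c0 : PySem.Dict String Int)
    (S : Finset String) : Finset String :=
  S ∪ S.biUnion (fun k => (pvSuccsL H c0 k).toFinset)
def pvReachS (H : PySem.Dict String (List String)) (c0 : PySem.Dict String Int)
    (p : String) : Finset String :=
  (pvStepF H c0)^[pvN H] {p}
def pvReach1 (H : PySem.Dict String (List String)) (c0 : PySem.Dict String Int)
    (k : String) : Finset String :=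
  (pvStepF H c0)^[pvN H] (pvSuccsL H c0 k).toFinset

-- Pre_ excludes exactly the inputs on which the Python A raises: a KeyError (the pattern,
-- or some sub-pattern reachable through uncached non-empty sub-patterns, is not a key of
-- histories) or a RecursionError (a cycle is reachable); it is the closed-form termination
-- condition of A's memoized recursion.
def Pre_recursively_count (histories : List (String × List String)) (pattern : String) (counts : List (String × Int)) : Prop :=
  ∀ k ∈ pvReachS (PySem.Dict.ofList histories) (PySem.Dict.ofList counts) pattern,
    ((PySem.Dict.ofList histories).get? k).isSome = true ∧
    k ∉ pvReach1 (PySem.Dict.ofList histories) (PySem.Dict.ofList counts) k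
instance (histories : List (String × List String)) (pattern : String) (counts : List (String × Int)) : Decidable (Pre_recursively_count histories pattern counts) := by unfold Pre_recursively_count; infer_instance

def pvWitness_recursively_count : (List (String × List String)) × String × (List (String × Int)) :=
  ([("ab", ["", "b"]), ("b", [""])], "ab", [("z", 5)])

def Spec_recursively_count (histories : List (String × List String)) (pattern : String) (counts : List (String × Int)) (out : Int) : Prop := out = recursively_count_alt histories pattern counts
instance (histories : List (String × List String)) (pattern : String) (counts : List (String × Int)) (out : Int) : Decidable (Spec_recursively_count histories pattern counts out) := by unfold Spec_recursively_count; infer_instance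

-- ===== CLAIM (what is proved, stated in full; the proofs are below) =====
def Claim_equal_recursively_count : Prop := ∀ (histories : List (String × List String)) (pattern : String) (counts : List (String × Int)), Dom_recursively_count histories pattern counts → Pre_recursively_count histories pattern counts → Spec_recursively_count histories pattern counts (recursively_count histories pattern counts)


-- ===== LEMMAS AND PROOFS =====

-- ---- reachability-closure machinery ----

lemma pvStepF_subset (H : PySem.Dict String (List String)) (c0 : PySem.Dict String Int)
    (S : Finset String) : S ⊆ pvStepF H c0 S := Finset.subset_union_left

lemma pvStepF_mono (H : PySem.Dict String (List String)) (c0 : PySem.Dict String Int)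
    {S T : Finset String} (h : S ⊆ T) : pvStepF H c0 S ⊆ pvStepF H c0 T := by
  unfold pvStepF
  exact Finset.union_subset_union h (Finset.biUnion_subset_biUnion_of_subset_left _ h)

lemma pvIter_mono (H : PySem.Dict String (List String)) (c0 : PySem.Dict String Int)
    (n : Nat) {S T : Finset String} (h : S ⊆ T) :
    (pvStepF H c0)^[n] S ⊆ (pvStepF H c0)^[n] T := by
  induction n generalizing S T with
  | zero => simpa using h
  | succ n ih =>
    rw [Function.iterate_succ_apply, Function.iterate_succ_apply]
    exact ih (pvStepF_mono H c0 h)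

lemma pvIter_seed (H : PySem.Dict String (List String)) (c0 : PySem.Dict String Int)
    (n : Nat) (S : Finset String) : S ⊆ (pvStepF H c0)^[n] S := by
  induction n with
  | zero => simp
  | succ n ih =>
    rw [Function.iterate_succ_apply']
    exact ih.trans (pvStepF_subset H c0 _)

def pvAllSubs (H : PySem.Dict String (List String)) : Finset String :=
  (H.items.flatMap (fun kv => kv.2)).toFinset

lemma pvGetD_subset_allSubs (H : PySem.Dict String (List String)) (k : String) :
    ∀ s ∈ H.getD k [], s ∈ pvAllSubs H := by
  intro s hs
  rcases h : H.get? k with _ | l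
  · rw [PySem.Dict.getD_eq_get?_getD, h] at hs
    cases hs
  · rw [PySem.Dict.getD_eq_get?_getD, h] at hs
    have hitem := PySem.Dict.mem_items_of_get?_eq_some (d := H) h
    simp only [pvAllSubs, List.mem_toFinset, List.mem_flatMap]
    exact ⟨(k, l), hitem, hs⟩

lemma pvSuccs_subset_allSubs (H : PySem.Dict String (List String)) (c0 : PySem.Dict String Int)
    (k : String) : (pvSuccsL H c0 k).toFinset ⊆ pvAllSubs H := by
  intro s hs
  rw [List.mem_toFinset] at hs
  exact pvGetD_subset_allSubs H k s (List.mem_of_mem_filter hs)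

lemma pvStepF_bound (H : PySem.Dict String (List String)) (c0 : PySem.Dict String Int)
    {S V : Finset String} (hS : S ⊆ V) (hA : pvAllSubs H ⊆ V) : pvStepF H c0 S ⊆ V := by
  unfold pvStepF
  exact Finset.union_subset hS
    (Finset.biUnion_subset.mpr fun k _ => (pvSuccs_subset_allSubs H c0 k).trans hA)

lemma pvIter_bound (H : PySem.Dict String (List String)) (c0 : PySem.Dict String Int)
    (n : Nat) {S V : Finset String} (hS : S ⊆ V) (hA : pvAllSubs H ⊆ V) :
    (pvStepF H c0)^[n] S ⊆ V := by
  induction n with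
  | zero => simpa using hS
  | succ n ih =>
    rw [Function.iterate_succ_apply']
    exact pvStepF_bound H c0 ih hA

lemma pvIter_stable (H : PySem.Dict String (List String)) (c0 : PySem.Dict String Int)
    (S : Finset String) {i : Nat}
    (h : (pvStepF H c0)^[i] S = (pvStepF H c0)^[i + 1] S) :
    ∀ j, i ≤ j → (pvStepF H c0)^[j] S = (pvStepF H c0)^[i] S := by
  intro j hj
  induction j with
  | zero =>
    have : i = 0 := by omega
    rw [this]
  | succ j ih =>
    rcases Nat.eq_or_lt_of_le hj with he | hlt
    · rw [← he]
    · have hij : i ≤ j := by omega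
      rw [Function.iterate_succ_apply', ih hij,
        ← Function.iterate_succ_apply' (pvStepF H c0) i S, ← h]

lemma pvIter_grows (H : PySem.Dict String (List String)) (c0 : PySem.Dict String Int)
    (S : Finset String) :
    ∀ i, (∀ j < i, (pvStepF H c0)^[j] S ≠ (pvStepF H c0)^[j + 1] S) →
      i ≤ ((pvStepF H c0)^[i] S).card := by
  intro i
  induction i with
  | zero => intro _; exact Nat.zero_le _
  | succ i ih =>
    intro h
    have hi := ih (fun j hj => h j (by omega))
    have hne := h i (by omega)
    have hsub : (pvStepF H c0)^[i] S ⊆ (pvStepF H c0)^[i + 1] S := by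
      rw [Function.iterate_succ_apply']
      exact pvStepF_subset H c0 _
    have hlt : ((pvStepF H c0)^[i] S).card < ((pvStepF H c0)^[i + 1] S).card :=
      Finset.card_lt_card ((Finset.ssubset_iff_subset_ne).mpr ⟨hsub, hne⟩)
    omega

lemma pvIter_fixed (H : PySem.Dict String (List String)) (c0 : PySem.Dict String Int)
    {S V : Finset String} (hS : S ⊆ V) (hA : pvAllSubs H ⊆ V) {n : Nat} (hn : V.card ≤ n) :
    pvStepF H c0 ((pvStepF H c0)^[n] S) = (pvStepF H c0)^[n] S := by
  by_cases hall : ∀ j < V.card + 1, (pvStepF H c0)^[j] S ≠ (pvStepF H c0)^[j + 1] S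
  · exfalso
    have hgrow := pvIter_grows H c0 S (V.card + 1) hall
    have hbound := Finset.card_le_card (pvIter_bound H c0 (V.card + 1) hS hA)
    omega
  · push Not at hall
    obtain ⟨j, hj, he⟩ := hall
    have h1 := pvIter_stable H c0 S he n (by omega)
    have h2 := pvIter_stable H c0 S he (n + 1) (by omega)
    calc pvStepF H c0 ((pvStepF H c0)^[n] S) = (pvStepF H c0)^[n + 1] S :=
          (Function.iterate_succ_apply' _ _ _).symm
      _ = (pvStepF H c0)^[n] S := by rw [h1, h2]

lemma pvAllSubs_card_le (H : PySem.Dict String (List String)) :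
    (pvAllSubs H).card ≤ pvE H := by
  refine (List.toFinset_card_le _).trans ?_
  rw [List.length_flatMap]
  exact le_of_eq rfl

lemma pvReachS_fixed (H : PySem.Dict String (List String)) (c0 : PySem.Dict String Int)
    (p : String) : pvStepF H c0 (pvReachS H c0 p) = pvReachS H c0 p := by
  refine pvIter_fixed H c0 (V := insert p (pvAllSubs H)) ?_ ?_ ?_
  · simp
  · exact Finset.subset_insert _ _
  · have := pvAllSubs_card_le H
    have := Finset.card_insert_le p (pvAllSubs H)
    unfold pvN
    omega

lemma pvMem_stepF_of_succ (H : PySem.Dict String (List String)) (c0 : PySem.Dict String Int)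
    {S : Finset String} {k s : String} (hk : k ∈ S) (hs : s ∈ pvSuccsL H c0 k) :
    s ∈ pvStepF H c0 S := by
  unfold pvStepF
  exact Finset.mem_union_right _ (Finset.mem_biUnion.mpr ⟨k, hk, List.mem_toFinset.mpr hs⟩)

lemma pvReachS_closed (H : PySem.Dict String (List String)) (c0 : PySem.Dict String Int)
    (p : String) {k s : String} (hk : k ∈ pvReachS H c0 p) (hs : s ∈ pvSuccsL H c0 k) :
    s ∈ pvReachS H c0 p := by
  rw [← pvReachS_fixed H c0 p]
  exact pvMem_stepF_of_succ H c0 hk hs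

lemma pvSelf_mem_reachS (H : PySem.Dict String (List String)) (c0 : PySem.Dict String Int)
    (p : String) : p ∈ pvReachS H c0 p :=
  pvIter_seed H c0 (pvN H) {p} (Finset.mem_singleton_self p)

lemma pvSucc_mem_reach1 (H : PySem.Dict String (List String)) (c0 : PySem.Dict String Int)
    {k s : String} (hs : s ∈ pvSuccsL H c0 k) : s ∈ pvReach1 H c0 k :=
  pvIter_seed H c0 (pvN H) _ (List.mem_toFinset.mpr hs)

lemma pvReachS_sub_reach1 (H : PySem.Dict String (List String)) (c0 : PySem.Dict String Int)
    {k s : String} (hs : s ∈ pvSuccsL H c0 k) : pvReachS H c0 s ⊆ pvReach1 H c0 k :=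
  pvIter_mono H c0 (pvN H) (Finset.singleton_subset_iff.mpr (List.mem_toFinset.mpr hs))

lemma pvReach1_sub_reachS (H : PySem.Dict String (List String)) (c0 : PySem.Dict String Int)
    (s : String) : pvReach1 H c0 s ⊆ pvReachS H c0 s := by
  have h1 : (pvSuccsL H c0 s).toFinset ⊆ pvStepF H c0 {s} := by
    unfold pvStepF
    intro x hx
    exact Finset.mem_union_right _
      (Finset.mem_biUnion.mpr ⟨s, Finset.mem_singleton_self s, hx⟩)
  calc pvReach1 H c0 s ⊆ (pvStepF H c0)^[pvN H] (pvStepF H c0 {s}) :=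
        pvIter_mono H c0 (pvN H) h1
    _ = pvStepF H c0 ((pvStepF H c0)^[pvN H] {s}) := by
        rw [← Function.iterate_succ_apply, Function.iterate_succ_apply']
    _ = pvReachS H c0 s := pvReachS_fixed H c0 s

def pvRank (H : PySem.Dict String (List String)) (c0 : PySem.Dict String Int)
    (k : String) : Nat := (pvReach1 H c0 k).card

lemma pvRank_lt (H : PySem.Dict String (List String)) (c0 : PySem.Dict String Int)
    {k s : String} (hs : s ∈ pvSuccsL H c0 k) (hns : s ∉ pvReach1 H c0 s) :
    pvRank H c0 s < pvRank H c0 k := by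
  refine Finset.card_lt_card (Finset.ssubset_def.mpr ⟨?_, ?_⟩)
  · exact (pvReach1_sub_reachS H c0 s).trans (pvReachS_sub_reach1 H c0 hs)
  · intro h
    exact hns (h (pvSucc_mem_reach1 H c0 hs))

lemma pvRank_le_E (H : PySem.Dict String (List String)) (c0 : PySem.Dict String Int)
    (k : String) : pvRank H c0 k ≤ pvE H :=
  (Finset.card_le_card
    (pvIter_bound H c0 (pvN H) (pvSuccs_subset_allSubs H c0 k) (subset_refl _))).trans
    (pvAllSubs_card_le H)

-- ---- pure reference semantics ----

def pvPre (H : PySem.Dict String (List String)) (c0 : PySem.Dict String Int)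
    (pattern : String) : Prop :=
  ∀ k ∈ pvReachS H c0 pattern, (H.get? k).isSome = true ∧ k ∉ pvReach1 H c0 k

-- pure value of an uncached call; the rank guard only totalizes the definition and
-- always holds on branches actually taken under pvPre
def pvVal (H : PySem.Dict String (List String)) (c0 : PySem.Dict String Int)
    (p : String) : Int :=
  ((H.getD p []).map (fun sub =>
    match c0.get? sub with
    | some v => v
    | none =>
      if sub = "" then 1
      else if _h : pvRank H c0 sub < pvRank H c0 p then pvVal H c0 sub else 0)).sum
termination_by pvRank H c0 p
decreasing_by exact _h

def pvStep (H : PySem.Dict String (List String)) (c0 : PySem.Dict String Int)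
    (s : String) : Int :=
  match c0.get? s with
  | some v => v
  | none => if s = "" then 1 else pvVal H c0 s

def pvSum (H : PySem.Dict String (List String)) (c0 : PySem.Dict String Int)
    (p : String) : Int :=
  ((H.getD p []).map (pvStep H c0)).sum

lemma pvMem_succs (H : PySem.Dict String (List String)) (c0 : PySem.Dict String Int)
    {p sub : String} (hmem : sub ∈ H.getD p []) (hne : sub ≠ "")
    (hc : c0.get? sub = none) : sub ∈ pvSuccsL H c0 p := by
  refine List.mem_filter.mpr ⟨hmem, ?_⟩
  rw [PySem.Dict.contains_eq_isSome_get?, hc]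
  simp [hne]

lemma pvVal_eq_pvSum (H : PySem.Dict String (List String)) (c0 : PySem.Dict String Int)
    (pattern : String) (hpre : pvPre H c0 pattern) {p : String}
    (hp : p ∈ pvReachS H c0 pattern) : pvVal H c0 p = pvSum H c0 p := by
  rw [pvVal]
  unfold pvSum
  congr 1
  apply List.map_congr_left
  intro sub hsub
  rcases hc : c0.get? sub with _ | v
  · by_cases hz : sub = ""
    · subst hz; simp [pvStep, hc]
    · have hsucc := pvMem_succs H c0 hsub hz hc
      have hgood := pvReachS_closed H c0 pattern hp hsucc
      have hrank := pvRank_lt H c0 hsucc (hpre sub hgood).2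
      simp only [pvStep, hc, if_neg hz, dif_pos hrank]
  · simp [pvStep, hc]

-- ---- correctness of port A ----

-- condition available for each sub-pattern of a reachable p
def pvEdgeA (H : PySem.Dict String (List String)) (c0 : PySem.Dict String Int)
    (pattern p sub : String) : Prop :=
  (c0.get? sub).isSome = true ∨ sub = "" ∨
    (pvRank H c0 sub < pvRank H c0 p ∧ sub ∈ pvReachS H c0 pattern)

lemma pvEdge_of_good (H : PySem.Dict String (List String)) (c0 : PySem.Dict String Int)
    (pattern : String) (hpre : pvPre H c0 pattern) {p : String}
    (hp : p ∈ pvReachS H c0 pattern) :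
    ∀ sub ∈ H.getD p [], pvEdgeA H c0 pattern p sub := by
  intro sub hsub
  rcases hc : c0.get? sub with _ | v
  · by_cases hz : sub = ""
    · exact Or.inr (Or.inl hz)
    · have hsucc := pvMem_succs H c0 hsub hz hc
      have hgood := pvReachS_closed H c0 pattern hp hsucc
      exact Or.inr (Or.inr ⟨pvRank_lt H c0 hsucc (hpre sub hgood).2, hgood⟩)
  · exact Or.inl (by simp [hc])

-- the state invariant of A's cache (also reused for B's value table)
def pvInv (H : PySem.Dict String (List String)) (c0 c : PySem.Dict String Int) : Prop :=
  (∀ s v, c0.get? s = some v → c.get? s = some v) ∧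
  (∀ s v, c.get? s = some v → v = pvStep H c0 s)

lemma pvInv_c0 (H : PySem.Dict String (List String)) (c0 : PySem.Dict String Int) :
    pvInv H c0 c0 :=
  ⟨fun _ _ h => h, fun s v h => by simp [pvStep, h]⟩

lemma pvInv_insert (H : PySem.Dict String (List String)) (c0 c : PySem.Dict String Int)
    (hinv : pvInv H c0 c) (sub : String) (hc0 : c0.get? sub = none)
    (v : Int) (hv : v = pvStep H c0 sub) : pvInv H c0 (c.insert sub v) := by
  constructor
  · intro s w h0
    rw [PySem.Dict.get?_insert]
    split_ifs with hs
    · subst hs; rw [hc0] at h0; cases h0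
    · exact hinv.1 s w h0
  · intro s w h0
    rw [PySem.Dict.get?_insert] at h0
    split_ifs at h0 with hs
    · cases h0; subst hs; exact hv
    · exact hinv.2 s w h0

lemma pvBodyA_some (rec : String → PySem.Dict String Int → Int × PySem.Dict String Int)
    (n : Int) (c : PySem.Dict String Int) (sub : String) (v : Int)
    (hc : c.get? sub = some v) : pvBodyA rec (n, c) sub = (n + v, c) := by
  simp [pvBodyA, hc]

lemma pvBodyA_empty (rec : String → PySem.Dict String Int → Int × PySem.Dict String Int)
    (n : Int) (c : PySem.Dict String Int) (sub : String)
    (hc : c.get? sub = none) (hz : sub = "") :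
    pvBodyA rec (n, c) sub = (n + 1, c.insert sub 1) := by
  subst hz
  simp [pvBodyA, hc]

lemma pvBodyA_rec (rec : String → PySem.Dict String Int → Int × PySem.Dict String Int)
    (n : Int) (c : PySem.Dict String Int) (sub : String)
    (hc : c.get? sub = none) (hz : sub ≠ "") :
    pvBodyA rec (n, c) sub = (n + (rec sub c).1, (rec sub c).2.insert sub (rec sub c).1) := by
  simp [pvBodyA, hc, hz]

lemma pvGoA_fold (H : PySem.Dict String (List String)) (c0 : PySem.Dict String Int)
    (pattern : String) (hpre : pvPre H c0 pattern) (f : Nat)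
    (ih : ∀ p c, pvInv H c0 c → pvRank H c0 p < f → p ∈ pvReachS H c0 pattern →
      (pvGoA H f p c).1 = pvSum H c0 p ∧ pvInv H c0 (pvGoA H f p c).2)
    (p : String) (hp : pvRank H c0 p < f + 1) :
    ∀ l : List String, (∀ sub ∈ l, pvEdgeA H c0 pattern p sub) →
      ∀ (n : Int) (c : PySem.Dict String Int), pvInv H c0 c →
      (l.foldl (pvBodyA (pvGoA H f)) (n, c)).1 = n + (l.map (pvStep H c0)).sum ∧
      pvInv H c0 (l.foldl (pvBodyA (pvGoA H f)) (n, c)).2 := by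
  intro l
  induction l with
  | nil => intro _ n c hinv; simpa using hinv
  | cons sub l' ihl =>
    intro hedge n c hinv
    have hedge' : ∀ s ∈ l', pvEdgeA H c0 pattern p s :=
      fun s hs => hedge s (List.mem_cons_of_mem _ hs)
    have hesub := hedge sub (List.mem_cons_self ..)
    rw [List.foldl_cons, List.map_cons, List.sum_cons]
    rcases hc : c.get? sub with _ | v
    · have hc0 : c0.get? sub = none := by
        rcases h0 : c0.get? sub with _ | w
        · rfl
        · exact absurd (hinv.1 sub w h0) (by simp [hc])
      by_cases hz : sub = ""
      · have hstep : pvStep H c0 sub = 1 := by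
          rw [hz] at hc0 ⊢
          simp [pvStep, hc0]
        rw [pvBodyA_empty _ n c sub hc hz]
        have hinv' := pvInv_insert H c0 c hinv sub hc0 1 hstep.symm
        have hrest := ihl hedge' (n + 1) (c.insert sub 1) hinv'
        refine ⟨?_, hrest.2⟩
        rw [hrest.1, hstep]
        ring
      · have hkey : pvRank H c0 sub < pvRank H c0 p ∧ sub ∈ pvReachS H c0 pattern := by
          rcases hesub with h | h | h
          · rw [hc0] at h; cases h
          · exact absurd h hz
          · exact h
        have hrec := ih sub c hinv (by omega) hkey.2
        have hstep : pvStep H c0 sub = pvSum H c0 sub := by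
          simp only [pvStep, hc0, if_neg hz]
          exact pvVal_eq_pvSum H c0 pattern hpre hkey.2
        rw [pvBodyA_rec _ n c sub hc hz]
        have hinv' := pvInv_insert H c0 (pvGoA H f sub c).2 hrec.2 sub hc0
          (pvGoA H f sub c).1 (by rw [hrec.1, hstep])
        have hrest := ihl hedge' (n + (pvGoA H f sub c).1)
          ((pvGoA H f sub c).2.insert sub (pvGoA H f sub c).1) hinv'
        refine ⟨?_, hrest.2⟩
        rw [hrest.1, hrec.1, hstep]
        ring
    · have hstep := hinv.2 sub v hc
      rw [pvBodyA_some _ n c sub v hc]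
      have hrest := ihl hedge' (n + v) c hinv
      refine ⟨?_, hrest.2⟩
      rw [hrest.1, hstep]
      ring

lemma pvGoA_spec (H : PySem.Dict String (List String)) (c0 : PySem.Dict String Int)
    (pattern : String) (hpre : pvPre H c0 pattern) :
    ∀ f p c, pvInv H c0 c → pvRank H c0 p < f → p ∈ pvReachS H c0 pattern →
      (pvGoA H f p c).1 = pvSum H c0 p ∧ pvInv H c0 (pvGoA H f p c).2 := by
  intro f
  induction f with
  | zero => intro p c _ hp; omega
  | succ f ih =>
    intro p c hinv hp hgood
    have hedge := pvEdge_of_good H c0 pattern hpre hgood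
    have := pvGoA_fold H c0 pattern hpre f ih p hp (H.getD p []) hedge 0 c hinv
    rw [pvGoA]
    refine ⟨?_, this.2⟩
    rw [this.1]
    unfold pvSum
    ring

-- ---- correctness of port B ----

-- B's value-table invariant: pvInv plus "an uncached empty pattern is never tabled"
def pvInvB (H : PySem.Dict String (List String)) (c0 v : PySem.Dict String Int) : Prop :=
  pvInv H c0 v ∧ (c0.get? "" = none → v.get? "" = none)

lemma pvInvB_c0 (H : PySem.Dict String (List String)) (c0 : PySem.Dict String Int) :
    pvInvB H c0 c0 := ⟨pvInv_c0 H c0, fun h => h⟩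

lemma pvTotal_aux (v : PySem.Dict String Int) :
    ∀ (subs : List String) (a : Int),
      subs.foldl (fun n s => n + (match v.get? s with | some w => w | none => 1)) a =
      a + (subs.map (fun s => (match v.get? s with | some w => w | none => (1 : Int)))).sum := by
  intro subs
  induction subs with
  | nil => intro a; simp
  | cons s subs ih =>
    intro a
    rw [List.foldl_cons, ih, List.map_cons, List.sum_cons]
    ring

lemma pvKnown_mono {v v0 : PySem.Dict String Int}
    (hsub : ∀ s w, v0.get? s = some w → v.get? s = some w) {s : String}
    (h : pvKnown v0 s = true) : pvKnown v s = true := by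
  unfold pvKnown at h ⊢
  rcases Bool.or_eq_true_iff.mp h with h1 | h2
  · exact Bool.or_eq_true_iff.mpr (Or.inl h1)
  · rw [PySem.Dict.contains_eq_isSome_get?] at h2 ⊢
    rcases hv : v0.get? s with _ | w
    · rw [hv] at h2; cases h2
    · rw [hsub s w hv]
      simp

lemma pvTerm_eq_pvStep (H : PySem.Dict String (List String)) {c0 v : PySem.Dict String Int}
    (hinv : pvInvB H c0 v) {s : String} (hk : pvKnown v s = true) :
    (match v.get? s with | some w => w | none => (1 : Int)) = pvStep H c0 s := by
  rcases hv : v.get? s with _ | w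
  · have hz : s = "" := by
      unfold pvKnown at hk
      rcases Bool.or_eq_true_iff.mp hk with h1 | h2
      · exact (beq_iff_eq).mp h1
      · rw [PySem.Dict.contains_eq_isSome_get?, hv] at h2; cases h2
    subst hz
    have hc0 : c0.get? "" = none := by
      rcases h0 : c0.get? "" with _ | w
      · rfl
      · exact absurd (hinv.1.1 _ _ h0) (by simp [hv])
    simp [pvStep, hc0]
  · exact hinv.1.2 s w hv

lemma pvTotal_eq_pvSum (H : PySem.Dict String (List String)) {c0 v : PySem.Dict String Int}
    (hinv : pvInvB H c0 v) {subs : List String} (hall : subs.all (pvKnown v) = true) :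
    pvTotal v subs = (subs.map (pvStep H c0)).sum := by
  unfold pvTotal
  rw [pvTotal_aux, zero_add]
  congr 1
  apply List.map_congr_left
  intro s hs
  exact pvTerm_eq_pvStep H hinv (by
    rw [List.all_eq_true] at hall
    exact hall s hs)

-- one iteration of B's `for k in reachable` loop body
def pvPassStep (H : PySem.Dict String (List String)) (v : PySem.Dict String Int)
    (k : String) : PySem.Dict String Int :=
  if (!(k == "") && !(v.contains k) && (H.getD k []).all (pvKnown v)) = true
  then v.insert k (pvTotal v (H.getD k []))
  else v

lemma pvPass_eq (H : PySem.Dict String (List String)) (rl : List String)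
    (v : PySem.Dict String Int) : pvPass H rl v = rl.foldl (pvPassStep H) v := rfl

lemma pvPassStep_mono (H : PySem.Dict String (List String)) {v : PySem.Dict String Int}
    {s : String} {w : Int} (h : v.get? s = some w) (k : String) :
    (pvPassStep H v k).get? s = some w := by
  unfold pvPassStep
  split_ifs with hg
  · rw [PySem.Dict.get?_insert]
    split_ifs with he
    · exfalso
      simp only [Bool.and_eq_true, Bool.not_eq_true'] at hg
      have := hg.1.2
      rw [PySem.Dict.contains_eq_isSome_get?, ← he, h] at this
      cases this
    · exact h
  · exact h

lemma pvFold_mono (H : PySem.Dict String (List String)) :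
    ∀ (l : List String) (v : PySem.Dict String Int) (s : String) (w : Int),
      v.get? s = some w → (l.foldl (pvPassStep H) v).get? s = some w := by
  intro l
  induction l with
  | nil => intro v s w h; simpa using h
  | cons j l' ih =>
    intro v s w h
    rw [List.foldl_cons]
    exact ih _ s w (pvPassStep_mono H h j)

lemma pvPassStep_inv (H : PySem.Dict String (List String)) (c0 : PySem.Dict String Int)
    (pattern : String) (hpre : pvPre H c0 pattern) {v : PySem.Dict String Int}
    (hinv : pvInvB H c0 v) {k : String} (hk : k ∈ pvReachS H c0 pattern) :
    pvInvB H c0 (pvPassStep H v k) := by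
  unfold pvPassStep
  split_ifs with hg
  · simp only [Bool.and_eq_true, Bool.not_eq_true'] at hg
    obtain ⟨⟨hkne, hkc⟩, hall⟩ := hg
    have hkne' : k ≠ "" := by simpa using hkne
    have hvk : v.get? k = none := by
      rw [PySem.Dict.contains_eq_isSome_get?] at hkc
      rcases hv : v.get? k with _ | w
      · rfl
      · rw [hv] at hkc; cases hkc
    have hc0k : c0.get? k = none := by
      rcases h0 : c0.get? k with _ | w
      · rfl
      · exact absurd (hinv.1.1 _ _ h0) (by simp [hvk])
    have htot : pvTotal v (H.getD k []) = pvStep H c0 k := by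
      rw [pvTotal_eq_pvSum H hinv hall]
      simp only [pvStep, hc0k, if_neg hkne']
      rw [pvVal_eq_pvSum H c0 pattern hpre hk]
      rfl
    refine ⟨⟨?_, ?_⟩, ?_⟩
    · intro s w h0
      rw [PySem.Dict.get?_insert]
      split_ifs with he
      · subst he; rw [hc0k] at h0; cases h0
      · exact hinv.1.1 s w h0
    · intro s w h0
      rw [PySem.Dict.get?_insert] at h0
      split_ifs at h0 with he
      · cases h0; subst he; exact htot
      · exact hinv.1.2 s w h0
    · intro h0
      rw [PySem.Dict.get?_insert]
      split_ifs with he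
      · exact absurd he.symm hkne'
      · exact hinv.2 h0
  · exact hinv

lemma pvPass_inv (H : PySem.Dict String (List String)) (c0 : PySem.Dict String Int)
    (pattern : String) (hpre : pvPre H c0 pattern) :
    ∀ (rl : List String), (∀ k ∈ rl, k ∈ pvReachS H c0 pattern) →
      ∀ (v : PySem.Dict String Int), pvInvB H c0 v → pvInvB H c0 (pvPass H rl v) := by
  intro rl
  induction rl with
  | nil => intro _ v hinv; simpa [pvPass] using hinv
  | cons k rl' ih =>
    intro hr v hinv
    rw [pvPass_eq, List.foldl_cons, ← pvPass_eq]
    exact ih (fun j hj => hr j (List.mem_cons_of_mem _ hj))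
      _ (pvPassStep_inv H c0 pattern hpre hinv (hr k (List.mem_cons_self ..)))

lemma pvPassIter_inv (H : PySem.Dict String (List String)) (c0 : PySem.Dict String Int)
    (pattern : String) (hpre : pvPre H c0 pattern) (rl : List String)
    (hr : ∀ k ∈ rl, k ∈ pvReachS H c0 pattern) :
    ∀ i, pvInvB H c0 ((pvPass H rl)^[i] c0) := by
  intro i
  induction i with
  | zero => simpa using pvInvB_c0 H c0
  | succ i ih =>
    rw [Function.iterate_succ_apply']
    exact pvPass_inv H c0 pattern hpre rl hr _ ih

lemma pvPass_resolves (H : PySem.Dict String (List String)) {k : String} (hk1 : k ≠ "") :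
    ∀ (l : List String) (v v0 : PySem.Dict String Int),
      (∀ s w, v0.get? s = some w → v.get? s = some w) →
      (H.getD k []).all (pvKnown v0) = true → k ∈ l →
      ((l.foldl (pvPassStep H) v).get? k).isSome = true := by
  intro l
  induction l with
  | nil => intro _ _ _ _ hk; cases hk
  | cons j l' ih =>
    intro v v0 hsub hall hk
    rw [List.foldl_cons]
    have hsub' : ∀ s w, v0.get? s = some w → (pvPassStep H v j).get? s = some w :=
      fun s w h => pvPassStep_mono H (hsub s w h) j
    rcases List.mem_cons.mp hk with rfl | hk'
    · have hksome : ∃ w, (pvPassStep H v k).get? k = some w := by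
        rcases hv : v.get? k with _ | w
        · have hall' : (H.getD k []).all (pvKnown v) = true := by
            rw [List.all_eq_true] at hall ⊢
            exact fun s hs => pvKnown_mono hsub (hall s hs)
          unfold pvPassStep
          rw [if_pos]
          · exact ⟨_, PySem.Dict.get?_insert_self _ _ _⟩
          · simp only [Bool.and_eq_true, Bool.not_eq_true']
            refine ⟨⟨by simpa using hk1, ?_⟩, hall'⟩
            rw [PySem.Dict.contains_eq_isSome_get?, hv]
            rfl
        · exact ⟨w, pvPassStep_mono H hv k⟩
      obtain ⟨w, hw⟩ := hksome
      rw [pvFold_mono H l' _ k w hw]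
      rfl
    · exact ih (pvPassStep H v j) v0 hsub' hall hk'

lemma pvResolvedBy (H : PySem.Dict String (List String)) (c0 : PySem.Dict String Int)
    (pattern : String) (rl : List String) (hpre : pvPre H c0 pattern)
    (hr : ∀ k ∈ rl, k ∈ pvReachS H c0 pattern)
    (hcl : ∀ k ∈ rl, ∀ s ∈ pvSuccsL H c0 k, s ∈ rl) :
    ∀ i, ∀ k ∈ rl, k ≠ "" → c0.get? k = none → pvRank H c0 k < i →
      (((pvPass H rl)^[i] c0).get? k).isSome = true := by
  intro i
  induction i with
  | zero => intro k _ _ _ h; omega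
  | succ i ih =>
    intro k hkrl hkne hkc hrank
    rw [Function.iterate_succ_apply']
    have hinvi := pvPassIter_inv H c0 pattern hpre rl hr i
    have hall : (H.getD k []).all (pvKnown ((pvPass H rl)^[i] c0)) = true := by
      rw [List.all_eq_true]
      intro s hs
      rcases hcs : c0.get? s with _ | w
      · by_cases hz : s = ""
        · subst hz; simp [pvKnown]
        · have hsucc := pvMem_succs H c0 hs hz hcs
          have hsrl := hcl k hkrl s hsucc
          have hranks : pvRank H c0 s < pvRank H c0 k :=
            pvRank_lt H c0 hsucc
              (hpre s (pvReachS_closed H c0 pattern (hr k hkrl) hsucc)).2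
          have hsome := ih s hsrl hz hcs (by omega)
          unfold pvKnown
          rw [PySem.Dict.contains_eq_isSome_get?, hsome]
          simp
      · have := hinvi.1.1 s w hcs
        unfold pvKnown
        rw [PySem.Dict.contains_eq_isSome_get?, this]
        simp
    rw [pvPass_eq]
    exact pvPass_resolves H hkne rl _ _ (fun _ _ h => h) hall hkrl

lemma pvRounds_spec (H : PySem.Dict String (List String)) (c0 : PySem.Dict String Int)
    (pattern : String) (rl subsP : List String) (hpre : pvPre H c0 pattern)
    (hr : ∀ k ∈ rl, k ∈ pvReachS H c0 pattern) :
    ∀ (f : Nat) (v : PySem.Dict String Int) (j : Nat), j ≤ f →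
      subsP.all (pvKnown ((pvPass H rl)^[j] v)) = true → pvInvB H c0 v →
      pvInvB H c0 (pvRounds H rl subsP f v) ∧
      subsP.all (pvKnown (pvRounds H rl subsP f v)) = true := by
  intro f
  induction f with
  | zero =>
    intro v j hj hknown hinv
    have hj0 : j = 0 := by omega
    subst hj0
    rw [Function.iterate_zero_apply] at hknown
    simp only [pvRounds]
    exact ⟨hinv, hknown⟩
  | succ f ih =>
    intro v j hj hknown hinv
    rw [pvRounds]
    split_ifs with hc
    · exact ⟨hinv, hc⟩
    · have hj0 : j ≠ 0 := by
        rintro rfl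
        simp only [Function.iterate_zero_apply] at hknown
        exact hc hknown
      obtain ⟨j', rfl⟩ : ∃ j', j = j' + 1 := ⟨j - 1, by omega⟩
      refine ih (pvPass H rl v) j' (by omega) ?_
        (pvPass_inv H c0 pattern hpre rl hr v hinv)
      rw [← Function.iterate_succ_apply]
      exact hknown

-- ---- the reachability loop of B ----

lemma pvSum_getD_keys (H : PySem.Dict String (List String)) (hnd : H.keys.Nodup) :
    (∑ k ∈ H.keys.toFinset, (H.getD k []).length) = pvE H := by
  rw [List.sum_toFinset _ hnd]
  unfold pvE
  have hkeys : H.keys = H.items.map (fun kv => kv.1) := rfl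
  rw [hkeys, List.map_map]
  congr 1
  apply List.map_congr_left
  intro kv hkv
  show (H.getD kv.1 []).length = kv.2.length
  have hmem : (kv.1, kv.2) ∈ H.items := by simpa using hkv
  rw [PySem.Dict.getD_of_mem_items H hmem hnd]

lemma pvSum_getD_le (H : PySem.Dict String (List String)) (hnd : H.keys.Nodup)
    (S : Finset String) : (∑ k ∈ S, (H.getD k []).length) ≤ pvE H := by
  have h1 : (∑ k ∈ S, (H.getD k []).length) ≤
      ∑ k ∈ S ∪ H.keys.toFinset, (H.getD k []).length :=
    Finset.sum_le_sum_of_subset Finset.subset_union_left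
  have h2 : (∑ k ∈ H.keys.toFinset, (H.getD k []).length) =
      ∑ k ∈ S ∪ H.keys.toFinset, (H.getD k []).length := by
    refine Finset.sum_subset Finset.subset_union_right ?_
    intro x _ hnx
    have hx : H.get? x = none := by
      rw [PySem.Dict.get?_eq_none_iff_not_mem_keys]
      simpa using hnx
    rw [PySem.Dict.getD_eq_get?_getD, hx]
    rfl
  rw [← h2] at h1
  exact h1.trans (le_of_eq (pvSum_getD_keys H hnd))

def pvPhi (H : PySem.Dict String (List String)) (c0 : PySem.Dict String Int)
    (pattern : String) (fr r : List String) : Nat :=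
  fr.length + ∑ k ∈ (pvReachS H c0 pattern \ r.toFinset), (1 + (H.getD k []).length)

lemma pvReachS_card_le (H : PySem.Dict String (List String)) (c0 : PySem.Dict String Int)
    (p : String) : (pvReachS H c0 p).card ≤ pvN H := by
  have h1 : pvReachS H c0 p ⊆ insert p (pvAllSubs H) :=
    pvIter_bound H c0 (pvN H) (by simp) (Finset.subset_insert _ _)
  have h2 := Finset.card_insert_le p (pvAllSubs H)
  have h3 := pvAllSubs_card_le H
  have := Finset.card_le_card h1
  unfold pvN
  omega

lemma pvPhi_init_le (H : PySem.Dict String (List String)) (c0 : PySem.Dict String Int)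
    (pattern : String) (hnd : H.keys.Nodup) :
    pvPhi H c0 pattern [pattern] [] ≤ 2 * pvN H + 1 := by
  unfold pvPhi
  rw [Finset.sum_add_distrib]
  simp only [Finset.sum_const, smul_eq_mul, mul_one, List.toFinset_nil, Finset.sdiff_empty,
    List.length_singleton]
  have h1 := pvReachS_card_le H c0 pattern
  have h2 := pvSum_getD_le H hnd (pvReachS H c0 pattern)
  unfold pvN at *
  omega

lemma pvReachGo_spec (H : PySem.Dict String (List String)) (c0 : PySem.Dict String Int)
    (pattern : String) :
    ∀ (fuel : Nat) (fr r : List String),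
      (∀ x ∈ fr, x ∈ pvReachS H c0 pattern) →
      (∀ x ∈ r, x ∈ pvReachS H c0 pattern) →
      (∀ j ∈ r, ∀ s ∈ pvSuccsL H c0 j, s ∈ r ∨ s ∈ fr) →
      (pattern ∈ r ∨ pattern ∈ fr) →
      pvPhi H c0 pattern fr r ≤ fuel →
      (∀ x ∈ pvReachGo H c0 fuel fr r, x ∈ pvReachS H c0 pattern) ∧
      (∀ j ∈ pvReachGo H c0 fuel fr r, ∀ s ∈ pvSuccsL H c0 j,
        s ∈ pvReachGo H c0 fuel fr r) ∧
      pattern ∈ pvReachGo H c0 fuel fr r := by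
  intro fuel
  induction fuel with
  | zero =>
    intro fr r hfr hr hclosure hpat hphi
    have hfr0 : fr = [] := by
      cases fr with
      | nil => rfl
      | cons a l => unfold pvPhi at hphi; simp at hphi
    subst hfr0
    simp only [pvReachGo]
    refine ⟨hr, fun j hj s hs => (hclosure j hj s hs).resolve_right (by simp), ?_⟩
    rcases hpat with h | h
    · exact h
    · cases h
  | succ f ih =>
    intro fr r hfr hr hclosure hpat hphi
    match fr with
    | [] =>
      simp only [pvReachGo]
      refine ⟨hr, fun j hj s hs => (hclosure j hj s hs).resolve_right (by simp), ?_⟩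
      rcases hpat with h | h
      · exact h
      · cases h
    | k :: fr' =>
      rw [pvReachGo]
      by_cases hk : k ∈ r
      · rw [if_pos hk]
        refine ih fr' r (fun x hx => hfr x (List.mem_cons_of_mem _ hx)) hr ?_ ?_ ?_
        · intro j hj s hs
          rcases hclosure j hj s hs with h | h
          · exact Or.inl h
          · rcases List.mem_cons.mp h with rfl | h'
            · exact Or.inl hk
            · exact Or.inr h'
        · rcases hpat with h | h
          · exact Or.inl h
          · rcases List.mem_cons.mp h with rfl | h'
            · exact Or.inl hk
            · exact Or.inr h'
        · unfold pvPhi at hphi ⊢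
          simp only [List.length_cons] at hphi
          omega
      · rw [if_neg hk]
        have hkRS : k ∈ pvReachS H c0 pattern := hfr k (List.mem_cons_self ..)
        refine ih (fr' ++ pvSuccsL H c0 k) (r ++ [k]) ?_ ?_ ?_ ?_ ?_
        · intro x hx
          rcases List.mem_append.mp hx with h | h
          · exact hfr x (List.mem_cons_of_mem _ h)
          · exact pvReachS_closed H c0 pattern hkRS h
        · intro x hx
          rcases List.mem_append.mp hx with h | h
          · exact hr x h
          · rw [List.mem_singleton.mp h]; exact hkRS
        · intro j hj s hs
          rcases List.mem_append.mp hj with hjr | hjk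
          · rcases hclosure j hjr s hs with h | h
            · exact Or.inl (List.mem_append_left _ h)
            · rcases List.mem_cons.mp h with rfl | h'
              · exact Or.inl (List.mem_append_right _ (List.mem_singleton_self _))
              · exact Or.inr (List.mem_append_left _ h')
          · have hjk' := List.mem_singleton.mp hjk
            subst hjk'
            exact Or.inr (List.mem_append_right _ hs)
        · rcases hpat with h | h
          · exact Or.inl (List.mem_append_left _ h)
          · rcases List.mem_cons.mp h with rfl | h'
            · exact Or.inl (List.mem_append_right _ (List.mem_singleton_self _))
            · exact Or.inr (List.mem_append_left _ h')
        · -- the potential strictly decreases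
          unfold pvPhi at hphi ⊢
          have hkmem : k ∈ pvReachS H c0 pattern \ r.toFinset :=
            Finset.mem_sdiff.mpr ⟨hkRS, by simpa using hk⟩
          have hsd : pvReachS H c0 pattern \ (r ++ [k]).toFinset =
              (pvReachS H c0 pattern \ r.toFinset).erase k := by
            ext x
            simp only [Finset.mem_sdiff, Finset.mem_erase, List.mem_toFinset, List.mem_append,
              List.mem_singleton]
            tauto
          have hsum : (∑ x ∈ (pvReachS H c0 pattern \ r.toFinset).erase k,
              (1 + (H.getD x []).length)) + (1 + (H.getD k []).length) =
              ∑ x ∈ pvReachS H c0 pattern \ r.toFinset, (1 + (H.getD x []).length) := by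
            simpa using Finset.sum_erase_add _ (fun x => 1 + (H.getD x []).length) hkmem
          have hflt : (pvSuccsL H c0 k).length ≤ (H.getD k []).length := by
            unfold pvSuccsL
            exact List.length_filter_le _ _
          rw [List.length_append, hsd]
          simp only [List.length_cons] at hphi
          omega

-- ===== VERDICT (by name: the statement is the Claim_ definition above) =====
theorem recursively_count_spec : Claim_equal_recursively_count := by
  intro histories pattern counts _hdom hpre
  unfold Pre_recursively_count at hpre
  unfold Spec_recursively_count recursively_count recursively_count_alt
  simp only []
  set H := PySem.Dict.ofList histories with hH
  set c0 := PySem.Dict.ofList counts with hc0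
  have hpre' : pvPre H c0 pattern := hpre
  have hnd : H.keys.Nodup := PySem.Dict.nodup_keys_ofList histories
  -- port A computes the pure sum
  have hrank : pvRank H c0 pattern < pvN H + 1 := by
    have := pvRank_le_E H c0 pattern
    unfold pvN
    omega
  have hA := pvGoA_spec H c0 pattern hpre' (pvN H + 1) pattern c0 (pvInv_c0 H c0) hrank
    (pvSelf_mem_reachS H c0 pattern)
  -- the reachability loop of B
  have hreach := pvReachGo_spec H c0 pattern (2 * pvN H + 1) [pattern] []
    (fun x hx => by
      rw [List.mem_singleton.mp hx]
      exact pvSelf_mem_reachS H c0 pattern)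
    (fun x hx => absurd hx (List.not_mem_nil))
    (fun j hj => absurd hj (List.not_mem_nil))
    (Or.inr (List.mem_singleton_self pattern))
    (pvPhi_init_le H c0 pattern hnd)
  set rl := pvReachGo H c0 (2 * pvN H + 1) [pattern] [] with hrl
  obtain ⟨hrS, hrcl, hrpat⟩ := hreach
  -- after pvN H relaxation passes all of pattern's sub-patterns are known
  have hknown : (H.getD pattern []).all (pvKnown ((pvPass H rl)^[pvN H] c0)) = true := by
    rw [List.all_eq_true]
    intro s hs
    rcases hcs : c0.get? s with _ | w
    · by_cases hz : s = ""
      · subst hz; simp [pvKnown]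
      · have hsucc := pvMem_succs H c0 hs hz hcs
        have hsrl := hrcl pattern hrpat s hsucc
        have hsrank : pvRank H c0 s < pvN H := by
          have := pvRank_le_E H c0 s
          unfold pvN
          omega
        have hsome := pvResolvedBy H c0 pattern rl hpre' hrS hrcl (pvN H) s hsrl hz hcs hsrank
        unfold pvKnown
        rw [PySem.Dict.contains_eq_isSome_get?, hsome]
        simp
    · have hsome := (pvPassIter_inv H c0 pattern hpre' rl hrS (pvN H)).1.1 s w hcs
      unfold pvKnown
      rw [PySem.Dict.contains_eq_isSome_get?, hsome]
      simp
  have hrounds := pvRounds_spec H c0 pattern rl (H.getD pattern []) hpre' hrS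
    (pvN H) c0 (pvN H) le_rfl hknown (pvInvB_c0 H c0)
  rw [hA.1, pvTotal_eq_pvSum H hrounds.1 hrounds.2]
  rfl
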